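-- pv_equiv track=rewrite | github.com/michelesr/advent-of-code | 2024/day-9/main.py | has_gaps
-- ===== SOURCE A (Python) =====
-- def has_gaps(blocks):
--     found_free = False
--     for i in range(len(blocks)):
--         if blocks[i] == ".":
--             found_free = True
--         if found_free and blocks[i] != ".":
--             return True
--     return False
-- ===== SOURCE B (Python) =====
-- def has_gaps(blocks):
--     total_free = blocks.count(".")
--     trailing = 0
--     for b in reversed(blocks):
--         if b != ".":
--             break
--         trailing += 1
--     return total_free > trailing
-- ===== Notes on version B (the rewrite author's own statement) =====
-- stated objective: alternative
-- what changed: Replaces A's forward flag-carrying scan with a counting argument: count all free blocks, measure the trailing run of free blocks from the right, and report a gap iff some free block lies outside the trailing run (count > trailing).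
import Mathlib
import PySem

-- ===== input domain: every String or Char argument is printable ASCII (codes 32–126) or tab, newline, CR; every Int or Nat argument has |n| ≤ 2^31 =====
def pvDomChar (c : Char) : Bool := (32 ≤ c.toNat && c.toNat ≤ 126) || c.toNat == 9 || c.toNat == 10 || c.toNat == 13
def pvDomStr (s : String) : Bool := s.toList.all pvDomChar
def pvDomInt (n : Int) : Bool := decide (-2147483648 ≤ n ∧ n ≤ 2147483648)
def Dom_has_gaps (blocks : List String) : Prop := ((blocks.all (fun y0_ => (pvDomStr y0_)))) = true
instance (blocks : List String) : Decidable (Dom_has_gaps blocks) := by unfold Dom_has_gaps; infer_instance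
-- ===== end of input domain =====

-- B replaces A's forward flag-carrying scan by a counting argument: count the free
-- blocks and the trailing run of free blocks; a gap exists iff count > trailing run.

-- ===== PORT A =====
-- A's for-loop over range(len(blocks)) carrying the found_free flag, with early return.
def hasGapsLoop (blocks : List String) (found_free : Bool) : Bool :=
  match blocks with
  | [] => false
  | b :: rest =>
    let found_free := if b == "." then true else found_free
    if found_free && b != "." then true else hasGapsLoop rest found_free

def has_gaps (blocks : List String) : Bool := hasGapsLoop blocks false

-- ===== PORT B =====
-- the 'for b in reversed(blocks): if b != ".": break; trailing += 1' loop
def trailingFree (l : List String) : Nat :=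
  match l with
  | [] => 0
  | b :: rest => if b != "." then 0 else trailingFree rest + 1

def has_gaps_alt (blocks : List String) : Bool :=
  decide (PySem.List.count blocks "." > trailingFree blocks.reverse)

-- ===== PRECONDITION & SPEC =====
def Spec_has_gaps (blocks : List String) (out : Bool) : Prop := out = has_gaps_alt blocks
instance (blocks : List String) (out : Bool) : Decidable (Spec_has_gaps blocks out) := by unfold Spec_has_gaps; infer_instance

-- ===== CLAIM =====
def Claim_equal_has_gaps : Prop := ∀ (blocks : List String), Dom_has_gaps blocks → Spec_has_gaps blocks (has_gaps blocks)

-- ===== LEMMAS AND PROOFS =====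

theorem trailingFree_cons (b : String) (l : List String) :
    trailingFree (b :: l) = if b != "." then 0 else trailingFree l + 1 := rfl

theorem trailingFree_le_count (l : List String) :
    trailingFree l ≤ l.count "." := by
  induction l with
  | nil => simp [trailingFree]
  | cons b rest ih =>
    by_cases h : b = "."
    · subst h; simp [trailingFree]; omega
    · simp [trailingFree, h]

theorem trailingFree_append_singleton (xs : List String) (b : String) :
    trailingFree (xs ++ [b]) =
      if xs.all (fun x => x == ".") then trailingFree [b] + xs.length
      else trailingFree xs := by
  induction xs with
  | nil => simp
  | cons x xs' ih =>
    by_cases h : x = "."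
    · subst h
      have hstep : trailingFree (("." : String) :: (xs' ++ [b])) =
          trailingFree (xs' ++ [b]) + 1 := by
        rw [trailingFree_cons, if_neg (by simp)]
      rw [List.cons_append, hstep, ih]
      by_cases hc : xs'.all (fun x => x == ".") = true
      · rw [if_pos hc, if_pos (by simp [hc])]
        simp only [List.length_cons]
        omega
      · rw [if_neg hc, if_neg (by simp [hc])]
        have : trailingFree (("." : String) :: xs') = trailingFree xs' + 1 := by
          rw [trailingFree_cons, if_neg (by simp)]
        omega
    · have hx : (x != ".") = true := bne_iff_ne.mpr h
      have hL : trailingFree ((x :: xs') ++ [b]) = 0 := by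
        rw [List.cons_append, trailingFree_cons, if_pos hx]
      have hR : trailingFree (x :: xs') = 0 := by
        rw [trailingFree_cons, if_pos hx]
      rw [hL, if_neg (by simp [h]), hR]

theorem trailingFree_of_all (l : List String) (h : l.all (fun x => x == ".") = true) :
    trailingFree l = l.length := by
  induction l with
  | nil => rfl
  | cons y ys ihy =>
    simp only [List.all_cons, Bool.and_eq_true, beq_iff_eq] at h
    simp [trailingFree, h.1, ihy h.2]

-- once the flag is set, A's loop just looks for any non-"." element
theorem hasGapsLoop_true (blocks : List String) :
    hasGapsLoop blocks true = blocks.any (fun b => b != ".") := by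
  induction blocks with
  | nil => rfl
  | cons b rest ih =>
    simp only [hasGapsLoop, List.any_cons]
    by_cases h : b = "."
    · subst h; simp [ih]
    · simp [h]

theorem count_eq_length_of_all (l : List String) (h : l.all (fun x => x == ".") = true) :
    l.count "." = l.length := by
  induction l with
  | nil => rfl
  | cons b rest ih =>
    simp only [List.all_cons, Bool.and_eq_true, beq_iff_eq] at h
    simp [h.1, ih h.2]

theorem hasGapsLoop_false (blocks : List String) :
    hasGapsLoop blocks false = has_gaps_alt blocks := by
  induction blocks with
  | nil => rfl
  | cons b rest ih =>
    unfold has_gaps_alt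
    rw [PySem.List.count_eq]
    rw [List.reverse_cons, trailingFree_append_singleton]
    by_cases h : b = "."
    · subst h
      have hA : hasGapsLoop ("." :: rest) false = rest.any (fun x => x != ".") := by
        simp [hasGapsLoop, hasGapsLoop_true]
      rw [hA]
      by_cases hall : rest.reverse.all (fun x => x == ".") = true
      · have hall' : rest.all (fun x => x == ".") = true := by
          simpa using hall
        have hany : rest.any (fun x => x != ".") = false := by
          simp only [List.any_eq_false]
          intro x hx
          have hxeq : x = "." := beq_iff_eq.mp (List.all_eq_true.mp hall' x hx)
          simp [hxeq]
        have hc : rest.count "." = rest.length := count_eq_length_of_all rest hall'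
        simp [hall, hany, hc, trailingFree]
      · have hany : rest.any (fun x => x != ".") = true := by
          cases hx : rest.any (fun x => x != ".") with
          | true => rfl
          | false =>
            exfalso
            apply hall
            rw [List.all_eq_true]
            intro x hxm
            have hx' := List.any_eq_false.mp hx x (List.mem_reverse.mp hxm)
            by_contra hne
            exact hx' (bne_iff_ne.mpr (fun he => hne (beq_iff_eq.mpr he)))
        have hle : trailingFree rest.reverse ≤ rest.reverse.count "." :=
          trailingFree_le_count rest.reverse
        rw [List.count_reverse] at hle
        simp only [hall, hany]
        have hgt : rest.count "." + 1 > trailingFree rest.reverse := by omega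
        simp [hgt]
    · have hA : hasGapsLoop (b :: rest) false = hasGapsLoop rest false := by
        simp [hasGapsLoop, h]
      rw [hA, ih]
      unfold has_gaps_alt
      rw [PySem.List.count_eq]
      by_cases hall : rest.reverse.all (fun x => x == ".") = true
      · have hall' : rest.all (fun x => x == ".") = true := by simpa using hall
        have hc : rest.count "." = rest.length := count_eq_length_of_all rest hall'
        have htf : trailingFree rest.reverse = rest.length := by
          rw [trailingFree_of_all rest.reverse hall, List.length_reverse]
        have hbne : (b != ".") = true := bne_iff_ne.mpr h
        have htb : trailingFree [b] = 0 := by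
          rw [trailingFree_cons, if_pos hbne]
        rw [if_pos hall, htb, htf, hc]
        have hcc : List.count "." (b :: rest) = List.count "." rest := by
          simp [h]
        rw [hcc, hc]
        simp
      · simp [hall, h]

-- ===== VERDICT =====
theorem has_gaps_spec : Claim_equal_has_gaps := by
  intro blocks _
  unfold Spec_has_gaps has_gaps
  exact hasGapsLoop_false blocks
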